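-- pv_equiv track=rewrite | github.com/RCanDo/Python | Codility/task.py | solution
-- ===== SOURCE A (Python) =====
-- def solution(N):
--     """
--     For N in (1, 500)
--     Find smallest natural number greater then N
--     whose sum of digits is twice the sum of digits of N.
--     solution(14)   #-> 19
--     solution(15)   #-> 39
--     solution(10)   #-> 11
--     solution(100000)  #-> 100001
--     solution(99)   #-> 9999
--     solution(123)  #-> 129
--     solution(941)  #-> 1999
--     """
--     digits = [int(d) for d in list(str(N))][::-1]
--     s = sum(digits)
--
--     for i in range(len(digits)):
--         d = 9 - digits[i]   # always nonnegative
--         d = min(s, d)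
--         s -= d
--         digits[i] += d      # always <= 9
--         if s == 0:
--             break
--
--     while s > 0:
--         d = min(9, s)
--         digits.append(d)
--         s -= d
--
--     digits = [str(d) for d in digits]
--     result = int("".join(digits[::-1]))
--
--     return result
-- ===== SOURCE B (Python) =====
-- def solution(N):
--     body = str(N)
--     ds = [int(c) for c in body]
--     s = sum(ds)
--     g = 0
--     k = 0
--     for d in reversed(ds):
--         gn = g + 9 - d
--         if gn >= s:
--             return int(body[:len(ds) - k - 1] + str(d + s - g) + "9" * k)
--         g = gn
--         k += 1
--     r = s - g
--     q, m = r // 9, r % 9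
--     return int(("" if m == 0 else str(m)) + "9" * q + "9" * len(ds))
-- ===== Notes on version B (the rewrite author's own statement) =====
-- stated objective: alternative
-- what changed: A greedily mutates a reversed digit list to 9s and appends overflow digits in a while loop before re-joining every digit; B instead locates the cutoff digit with a running gain sum, builds the answer by slicing the original string plus a "9"*k repetition, and computes the overflow part in closed form with // and % instead of a loop.
import Mathlib
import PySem

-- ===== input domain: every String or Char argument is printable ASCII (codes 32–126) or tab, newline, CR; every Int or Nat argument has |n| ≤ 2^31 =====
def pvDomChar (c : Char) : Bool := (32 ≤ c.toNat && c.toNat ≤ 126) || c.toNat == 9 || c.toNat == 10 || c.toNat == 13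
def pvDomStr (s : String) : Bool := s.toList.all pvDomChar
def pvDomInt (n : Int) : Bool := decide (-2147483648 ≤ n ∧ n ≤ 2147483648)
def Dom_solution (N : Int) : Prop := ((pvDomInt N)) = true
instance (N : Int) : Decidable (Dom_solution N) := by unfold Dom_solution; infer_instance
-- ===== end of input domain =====

-- B replaces A's greedy digit-array mutation + overflow while-loop with a cutoff scan,
-- string slicing + "9"*k repetition and a closed-form // and % for the overflow (objective: alternative).

-- ===== PORT A =====
-- for i in range(len(digits)): d = 9 - digits[i]; d = min(s, d); s -= d; digits[i] += d; if s == 0: break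
def solutionLoop : List Int → Int → List Int × Int
  | [], s => ([], s)
  | d :: t, s =>
    let a := min s (9 - d)
    let s' := s - a
    if s' = 0 then ((d + a) :: t, (0 : Int))
    else
      let r := solutionLoop t s'
      ((d + a) :: r.1, r.2)

-- while s > 0: d = min(9, s); digits.append(d); s -= d
def solutionWhile (s : Int) : List Int :=
  if h : 0 < s then min 9 s :: solutionWhile (s - min 9 s) else []
termination_by s.toNat
decreasing_by
  have h1 : (1 : Int) ≤ min 9 s := le_min (by omega) h
  have h2 : min 9 s ≤ s := min_le_right 9 s
  omega

def solution (N : Int) : Int :=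
  -- digits = [int(d) for d in list(str(N))][::-1]  (int('-') raises ValueError when N < 0: excluded by Pre_solution, so the getD 0 default is never reached there)
  let digits := (PySem.List.slice? ((PySem.Int.toStr N).toList.map
      (fun c => (PySem.Int.ofChars? [c]).getD 0)) none none (-1)).getD []
  -- s = sum(digits)
  let s := digits.sum
  let p := solutionLoop digits s
  let digits2 := p.1 ++ solutionWhile p.2
  -- digits = [str(d) for d in digits]; result = int("".join(digits[::-1]))
  let strs := digits2.map PySem.Int.toStr
  (PySem.Int.ofStr? (PySem.Str.join "" ((PySem.List.slice? strs none none (-1)).getD []))).getD 0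

-- ===== PORT B =====
-- "9" * k : Python str*int repetition on chars (exact: k ≤ 0 gives "")
def solutionAltRepeat (k : Int) : List Char := List.replicate k.toNat '9'

-- the for-loop of Source B over reversed(ds) with accumulators g and k, early return, and the
-- closed-form overflow tail after the loop; strings are carried as their char lists (PySem.Chars level)
def solutionAltGo (body : List Char) (len s : Int) : List Int → Int → Int → Int
  | [], g, _k =>
    -- r = s - g; q, m = r // 9, r % 9; return int(("" if m == 0 else str(m)) + "9"*q + "9"*len(ds))
    let r := s - g
    let q := PySem.Int.floordiv r 9
    let m := PySem.Int.mod r 9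
    (PySem.Int.ofChars? ((if m = 0 then [] else PySem.Int.toChars m) ++
      solutionAltRepeat q ++ solutionAltRepeat len)).getD 0
  | d :: t, g, k =>
    let gn := g + 9 - d
    if s ≤ gn then
      -- return int(body[:len(ds) - k - 1] + str(d + s - g) + "9"*k)
      (PySem.Int.ofChars? (PySem.List.slice body none (some (len - k - 1)) ++
        PySem.Int.toChars (d + s - g) ++ solutionAltRepeat k)).getD 0
    else solutionAltGo body len s t gn (k + 1)

def solution_alt (N : Int) : Int :=
  let body := PySem.Int.toChars N   -- body = str(N), carried as chars
  let ds := body.map (fun c => (PySem.Int.ofChars? [c]).getD 0)  -- int('-') raises when N < 0: outside Pre_solution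
  let s := ds.sum
  solutionAltGo body (PySem.List.len ds) s ds.reverse 0 0

-- ===== PRECONDITION & SPEC =====
-- Python A raises ValueError on int('-') for every N < 0 (and returns on every N ≥ 0): Pre_ excludes exactly N < 0.
def Pre_solution (N : Int) : Prop := 0 ≤ N
instance (N : Int) : Decidable (Pre_solution N) := by unfold Pre_solution; infer_instance
def pvWitness_solution : Int := 14

def Spec_solution (N : Int) (out : Int) : Prop := out = solution_alt N
instance (N : Int) (out : Int) : Decidable (Spec_solution N out) := by unfold Spec_solution; infer_instance

-- ===== CLAIM (what is proved, stated in full; the proofs are below) =====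
def Claim_equal_solution : Prop := ∀ (N : Int), Dom_solution N → Pre_solution N → Spec_solution N (solution N)

-- ===== LEMMAS AND PROOFS =====

-- the value of a decimal digit character
def pvVal (c : Char) : Int := (c.toNat : Int) - 48

-- the character list of the final number, as a function of the LSB-first digit list and the budget s
def fChars : List Int → Int → List Char
  | [], r => (if PySem.Int.mod r 9 = 0 then [] else PySem.Int.toChars (PySem.Int.mod r 9)) ++
      List.replicate (PySem.Int.floordiv r 9).toNat '9'
  | d :: t, s =>
    if s ≤ 9 - d then (t.reverse.map PySem.Int.toChars).flatten ++ PySem.Int.toChars (d + s)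
    else fChars t (s - (9 - d)) ++ ['9']

theorem digit_enum (c : Char) (h : c.isDigit = true) :
    c = '0' ∨ c = '1' ∨ c = '2' ∨ c = '3' ∨ c = '4' ∨ c = '5' ∨ c = '6' ∨ c = '7' ∨ c = '8' ∨ c = '9' := by
  simp [Char.isDigit] at h
  obtain ⟨h1, h2⟩ := h
  have a : 48 ≤ c.val.toNat := UInt32.le_iff_toNat_le.mp h1
  have b : c.val.toNat ≤ 57 := UInt32.le_iff_toNat_le.mp h2
  have h48 : c.val.toNat = 48 ∨ c.val.toNat = 49 ∨ c.val.toNat = 50 ∨ c.val.toNat = 51 ∨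
      c.val.toNat = 52 ∨ c.val.toNat = 53 ∨ c.val.toNat = 54 ∨ c.val.toNat = 55 ∨
      c.val.toNat = 56 ∨ c.val.toNat = 57 := by omega
  rcases h48 with h|h|h|h|h|h|h|h|h|h
  · exact Or.inl (Char.ext (UInt32.toNat_inj.mp h))
  · exact Or.inr (Or.inl (Char.ext (UInt32.toNat_inj.mp h)))
  · exact Or.inr (Or.inr (Or.inl (Char.ext (UInt32.toNat_inj.mp h))))
  · exact Or.inr (Or.inr (Or.inr (Or.inl (Char.ext (UInt32.toNat_inj.mp h)))))
  · exact Or.inr (Or.inr (Or.inr (Or.inr (Or.inl (Char.ext (UInt32.toNat_inj.mp h))))))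
  · exact Or.inr (Or.inr (Or.inr (Or.inr (Or.inr (Or.inl (Char.ext (UInt32.toNat_inj.mp h)))))))
  · exact Or.inr (Or.inr (Or.inr (Or.inr (Or.inr (Or.inr (Or.inl (Char.ext (UInt32.toNat_inj.mp h))))))))
  · exact Or.inr (Or.inr (Or.inr (Or.inr (Or.inr (Or.inr (Or.inr (Or.inl (Char.ext (UInt32.toNat_inj.mp h)))))))))
  · exact Or.inr (Or.inr (Or.inr (Or.inr (Or.inr (Or.inr (Or.inr (Or.inr (Or.inl (Char.ext (UInt32.toNat_inj.mp h))))))))))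
  · exact Or.inr (Or.inr (Or.inr (Or.inr (Or.inr (Or.inr (Or.inr (Or.inr (Or.inr (Char.ext (UInt32.toNat_inj.mp h))))))))))

theorem ofChars_digit (c : Char) (h : c.isDigit = true) :
    PySem.Int.ofChars? [c] = some (pvVal c) := by
  rcases digit_enum c h with h|h|h|h|h|h|h|h|h|h <;> subst h <;> decide

theorem toChars_digit (c : Char) (h : c.isDigit = true) :
    PySem.Int.toChars (pvVal c) = [c] := by
  rcases digit_enum c h with h|h|h|h|h|h|h|h|h|h <;> subst h <;> decide

theorem val_bounds (c : Char) (h : c.isDigit = true) : 0 ≤ pvVal c ∧ pvVal c ≤ 9 := by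
  rcases digit_enum c h with h|h|h|h|h|h|h|h|h|h <;> subst h <;> decide

theorem join_nil_flatten (ps : List (List Char)) : PySem.Chars.join [] ps = ps.flatten := by
  match ps with
  | [] => simp [PySem.Chars.join_nil]
  | [p] => simp [PySem.Chars.join_singleton]
  | p :: q :: rest =>
    rw [PySem.Chars.join_cons_cons, join_nil_flatten (q :: rest)]
    simp

theorem flatten_singletons (l : List Char) : (l.map (fun c => [c])).flatten = l := by
  induction l with
  | nil => rfl
  | cons c t ih => simp [ih]

theorem whileChars (s : Int) (hs : 0 ≤ s) :
    ((solutionWhile s).reverse.map PySem.Int.toChars).flatten = fChars [] s := by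
  rw [solutionWhile]
  by_cases h : 0 < s
  · rw [dif_pos h]
    by_cases h9 : s ≤ 9
    · have hmin : min 9 s = s := by omega
      rw [hmin]
      have : s - s = 0 := by omega
      rw [this, solutionWhile]
      by_cases he : s = 9
      · subst he; decide
      · have hm : s % 9 = s := by omega
        have hd : (s / 9).toNat = 0 := by omega
        simp [fChars, hm, hd]
        exact fun h0 => absurd h0 (by omega)
    · have hmin : min 9 s = (9 : Int) := by omega
      rw [hmin]
      have ih := whileChars (s - 9) (by omega)
      have hm : PySem.Int.mod s 9 = PySem.Int.mod (s - 9) 9 := by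
        rw [PySem.Int.mod_eq_emod_of_pos (by omega), PySem.Int.mod_eq_emod_of_pos (by omega)]
        omega
      have hd : (PySem.Int.floordiv s 9).toNat = (PySem.Int.floordiv (s - 9) 9).toNat + 1 := by
        rw [PySem.Int.floordiv_eq_ediv_of_pos (by omega), PySem.Int.floordiv_eq_ediv_of_pos (by omega)]
        omega
      simp only [List.reverse_cons, List.map_append, List.flatten_append, ih]
      have h9c : PySem.Int.toChars 9 = ['9'] := by decide
      have hdt : (s / 9).toNat = ((s - 9) / 9).toNat + 1 := by omega
      simp [fChars, hm, h9c, hdt, List.replicate_succ']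
  · rw [dif_neg h]
    have : s = 0 := by omega
    subst this
    decide
termination_by s.toNat
decreasing_by omega

theorem loopChars (rds : List Int) (s : Int) (hs : 0 ≤ s) (hb : ∀ d ∈ rds, 0 ≤ d ∧ d ≤ 9) :
    (((solutionLoop rds s).1 ++ solutionWhile (solutionLoop rds s).2).reverse.map
      PySem.Int.toChars).flatten = fChars rds s := by
  induction rds generalizing s with
  | nil =>
    simp only [solutionLoop, List.nil_append]
    exact whileChars s hs
  | cons d t ih =>
    obtain ⟨hd0, hd9⟩ := hb d (by simp)
    by_cases hc : s ≤ 9 - d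
    · have hmin : min s (9 - d) = s := by omega
      simp only [solutionLoop, hmin]
      rw [if_pos (by omega : s - s = (0:Int))]
      rw [solutionWhile, dif_neg (by omega : ¬ (0:Int) < 0)]
      simp [fChars, if_pos hc]
    · have hmin : min s (9 - d) = 9 - d := by omega
      simp only [solutionLoop, hmin]
      rw [if_neg (by omega : ¬ (s - (9 - d) = (0:Int)))]
      have ih' := ih (s - (9 - d)) (by omega) (fun x hx => hb x (by simp [hx]))
      have hx9 : d + (9 - d) = (9:Int) := by omega
      have h9c : PySem.Int.toChars 9 = ['9'] := by decide
      rw [fChars, if_neg hc, ← ih']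
      simp [hx9, h9c, List.reverse_append]

theorem bGo_eq (cs : List Char) (s : Int) (hdig : ∀ c ∈ cs, c.isDigit = true) :
    ∀ (t : List Int) (pre suf : List Char) (g k : Int),
      cs = pre ++ suf → (pre.map pvVal).reverse = t → (suf.length : Int) = k →
      solutionAltGo cs (cs.length : Int) s t g k =
        (PySem.Int.ofChars? (fChars t (s - g) ++ List.replicate suf.length '9')).getD 0 := by
  intro t
  induction t with
  | nil =>
    intro pre suf g' k' hcs hpre hk
    have hpre0 : pre = [] := by
      cases pre with
      | nil => rfl
      | cons a b => simp at hpre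
    subst hpre0
    simp only [List.nil_append] at hcs
    subst hcs
    subst hk
    simp [solutionAltGo, solutionAltRepeat, fChars]
  | cons d t2 ih =>
    intro pre suf g' k' hcs hpre hk
    have hpre' : pre.map pvVal = t2.reverse ++ [d] := by
      have := congrArg List.reverse hpre
      simpa using this
    rcases List.map_eq_append_iff.mp hpre' with ⟨pre', ys, hsplit, hxs, hys⟩
    rcases List.map_eq_singleton_iff.mp hys with ⟨c0, hc0, hval⟩
    subst hsplit hc0
    have hdigs : ∀ c ∈ pre' ++ [c0], c.isDigit = true := by
      intro c hc; exact hdig c (by rw [hcs]; exact List.mem_append_left _ hc)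
    have hflat : (t2.reverse.map PySem.Int.toChars).flatten = pre' := by
      rw [← hxs, List.map_map]
      have : pre'.map (PySem.Int.toChars ∘ pvVal) = pre'.map (fun c => [c]) := by
        apply List.map_congr_left
        intro c hc
        exact toChars_digit c (hdigs c (List.mem_append_left _ hc))
      rw [this, flatten_singletons]
    have hlen : cs.length = pre'.length + 1 + suf.length := by
      rw [hcs]; simp; omega
    by_cases hcond : s ≤ g' + 9 - d
    · rw [solutionAltGo, if_pos hcond, fChars, if_pos (by omega : s - g' ≤ 9 - d)]
      have hslice : (cs.length : Int) - k' - 1 = ((pre'.length : Nat) : Int) := by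
        rw [hlen]; push_cast; omega
      rw [hslice, PySem.List.slice_to_natCast]
      have htake : cs.take pre'.length = pre' := by
        rw [hcs, List.append_assoc, List.take_left]
      rw [htake, hflat]
      have harg : d + s - g' = d + (s - g') := by ring
      rw [harg]
      have hrep : solutionAltRepeat k' = List.replicate suf.length '9' := by
        rw [solutionAltRepeat, ← hk, Int.toNat_natCast]
      rw [hrep]
    · rw [solutionAltGo, if_neg hcond, fChars, if_neg (by omega : ¬ (s - g' ≤ 9 - d))]
      have ihx := ih pre' (c0 :: suf) (g' + 9 - d) (k' + 1)
        (by rw [hcs, List.append_assoc]; rfl)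
        (by rw [hxs, List.reverse_reverse])
        (by simp only [List.length_cons]; push_cast; omega)
      rw [ihx]
      have harg : s - (g' + 9 - d) = s - g' - (9 - d) := by ring
      rw [harg]
      congr 1
      rw [List.length_cons, List.replicate_succ]
      simp

-- ===== VERDICT (by name: the statement is the Claim_ definition above) =====
theorem toStr_digits (N : Int) (h : 0 ≤ N) :
    ∀ c ∈ (PySem.Int.toStr N).toList, c.isDigit = true := by
  intro c hc
  rw [PySem.Int.toList_toStr, PySem.Int.toChars, if_neg (by omega : ¬ N < 0)] at hc
  exact Nat.isDigit_of_mem_toDigits (by norm_num) (by norm_num) hc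

theorem solution_spec : Claim_equal_solution := by
  intro N hdom hpre
  unfold Spec_solution
  have hdig : ∀ c ∈ (PySem.Int.toStr N).toList, c.isDigit = true := toStr_digits N hpre
  have hmap : (PySem.Int.toStr N).toList.map (fun c => (PySem.Int.ofChars? [c]).getD 0)
      = (PySem.Int.toStr N).toList.map pvVal := by
    apply List.map_congr_left
    intro c hc
    rw [ofChars_digit c (hdig c hc)]
    rfl
  have hb : ∀ d ∈ ((PySem.Int.toStr N).toList.map pvVal).reverse, 0 ≤ d ∧ d ≤ 9 := by
    intro d hd
    rw [List.mem_reverse, List.mem_map] at hd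
    obtain ⟨c, hc, rfl⟩ := hd
    exact val_bounds c (hdig c hc)
  have hsum : 0 ≤ (((PySem.Int.toStr N).toList.map pvVal).reverse).sum :=
    List.sum_nonneg (fun x hx => (hb x hx).1)
  have hb' : ∀ d ∈ (PySem.Int.toStr N).toList.reverse.map pvVal, 0 ≤ d ∧ d ≤ 9 := by
    simpa [List.map_reverse] using hb
  have hsum' : 0 ≤ ((PySem.Int.toStr N).toList.reverse.map pvVal).sum := by
    simpa [List.map_reverse] using hsum
  -- A's value
  have hA : solution N = (PySem.Int.ofChars?
      (fChars ((PySem.Int.toStr N).toList.reverse.map pvVal)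
        ((PySem.Int.toStr N).toList.reverse.map pvVal).sum)).getD 0 := by
    rw [solution]
    simp only [PySem.List.slice?_none_none_neg_one, Option.getD_some, hmap]
    rw [PySem.Int.ofStr?, PySem.Str.toList_join,
      show ("".toList : List Char) = [] from rfl, join_nil_flatten]
    simp only [← List.map_reverse, List.map_map]
    have hcomp : (String.toList ∘ PySem.Int.toStr) = PySem.Int.toChars := by
      funext x; exact PySem.Int.toList_toStr x
    rw [hcomp]
    rw [loopChars _ _ hsum' hb']
  -- B's value
  have hB : solution_alt N = (PySem.Int.ofChars?
      (fChars ((PySem.Int.toStr N).toList.map pvVal).reverse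
        ((PySem.Int.toStr N).toList.map pvVal).sum)).getD 0 := by
    rw [solution_alt]
    simp only [← PySem.Int.toList_toStr, hmap]
    have hlen : PySem.List.len ((PySem.Int.toStr N).toList.map pvVal)
        = (((PySem.Int.toStr N).toList.length : Nat) : Int) := by
      simp [PySem.List.len_eq]
    rw [hlen]
    have := bGo_eq (PySem.Int.toStr N).toList ((PySem.Int.toStr N).toList.map pvVal).sum hdig
      ((PySem.Int.toStr N).toList.map pvVal).reverse (PySem.Int.toStr N).toList [] 0 0
      (by simp) rfl (by simp)
    rw [this]
    simp
  rw [hA, hB]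
  simp [List.map_reverse, List.sum_reverse]
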